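-- pv_equiv track=rewrite | github.com/METResearchGroup/bluesky-research | services/backfill/core/manager.py | generate_pds_endpoint_to_dids_map
-- ===== SOURCE A (Python) =====
-- def generate_pds_endpoint_to_dids_map(
--     did_to_pds_endpoint_map: dict[str, str],
-- ) -> dict[str, list[str]]:
--     """Generates the PLC endpoint to DIDs map."""
--     pds_endpoint_to_dids_map: dict[str, list[str]] = {}
--     for did, pds_endpoint in did_to_pds_endpoint_map.items():
--         if pds_endpoint not in pds_endpoint_to_dids_map:
--             pds_endpoint_to_dids_map[pds_endpoint] = []
--         pds_endpoint_to_dids_map[pds_endpoint].append(did)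
--     return pds_endpoint_to_dids_map
-- ===== SOURCE B (Python) =====
-- def generate_pds_endpoint_to_dids_map(
--     did_to_pds_endpoint_map: dict[str, str],
-- ) -> dict[str, list[str]]:
--     """Generates the PLC endpoint to DIDs map."""
--     items = list(did_to_pds_endpoint_map.items())
--     endpoints = dict.fromkeys(ep for _, ep in items)
--     return {ep: [did for did, e in items if e == ep] for ep in endpoints}
-- ===== Notes on version B (the rewrite author's own statement) =====
-- stated objective: alternative
-- what changed: B replaces A's single-pass dict-building loop (create-bucket-then-append) by a two-phase decomposition: first collect the distinct endpoints in first-occurrence order with dict.fromkeys, then build each bucket in one comprehension by filtering the items for that endpoint.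
import Mathlib
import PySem

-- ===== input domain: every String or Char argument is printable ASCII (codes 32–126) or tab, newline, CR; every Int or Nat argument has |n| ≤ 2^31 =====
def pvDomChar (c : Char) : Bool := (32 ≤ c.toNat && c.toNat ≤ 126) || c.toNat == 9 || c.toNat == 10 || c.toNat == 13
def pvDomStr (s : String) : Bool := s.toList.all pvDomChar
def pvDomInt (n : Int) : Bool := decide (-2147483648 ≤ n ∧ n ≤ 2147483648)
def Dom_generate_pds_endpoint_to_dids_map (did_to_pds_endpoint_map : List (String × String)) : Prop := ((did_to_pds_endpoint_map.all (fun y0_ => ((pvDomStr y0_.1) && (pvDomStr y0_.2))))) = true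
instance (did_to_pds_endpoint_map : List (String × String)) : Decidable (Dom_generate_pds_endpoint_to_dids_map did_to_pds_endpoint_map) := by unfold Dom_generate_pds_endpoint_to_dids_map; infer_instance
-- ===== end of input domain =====

-- B replaces A's single-pass bucket-building loop by two phases (distinct endpoints, then one
-- filter pass per endpoint); alternative decomposition, same return value.

-- ===== PORT A =====
-- for did, pds_endpoint in items: if ep not in map: map[ep] = []; map[ep].append(did)
def generate_pds_endpoint_to_dids_map (did_to_pds_endpoint_map : List (String × String)) : List (String × List String) :=
  (did_to_pds_endpoint_map.foldl
    (fun d p =>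
      let d := if d.contains p.2 then d else d.insert p.2 []
      d.modify p.2 [] (fun l => l ++ [p.1]))
    (PySem.Dict.empty : PySem.Dict String (List String))).items

-- ===== PORT B =====
-- endpoints = dict.fromkeys(ep for _, ep in items); {ep: [did for did, e in items if e == ep] for ep in endpoints}
def generate_pds_endpoint_to_dids_map_alt (did_to_pds_endpoint_map : List (String × String)) : List (String × List String) :=
  let endpoints := PySem.Set.ofList (did_to_pds_endpoint_map.map (·.2))
  endpoints.map (fun ep =>
    (ep, (did_to_pds_endpoint_map.filter (fun p => p.2 == ep)).map (·.1)))

-- ===== PRECONDITION & SPEC =====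
def Spec_generate_pds_endpoint_to_dids_map (did_to_pds_endpoint_map : List (String × String)) (out : List (String × List String)) : Prop := out = generate_pds_endpoint_to_dids_map_alt did_to_pds_endpoint_map
instance (did_to_pds_endpoint_map : List (String × String)) (out : List (String × List String)) : Decidable (Spec_generate_pds_endpoint_to_dids_map did_to_pds_endpoint_map out) := by unfold Spec_generate_pds_endpoint_to_dids_map; infer_instance

-- ===== CLAIM (what is proved, stated in full; the proofs are below) =====
def Claim_equal_generate_pds_endpoint_to_dids_map : Prop := ∀ (did_to_pds_endpoint_map : List (String × String)), Dom_generate_pds_endpoint_to_dids_map did_to_pds_endpoint_map → Spec_generate_pds_endpoint_to_dids_map did_to_pds_endpoint_map (generate_pds_endpoint_to_dids_map did_to_pds_endpoint_map)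

-- ===== LEMMAS AND PROOFS =====

-- A's loop body (create bucket if absent, then append) is exactly 'modify with default []'.
theorem aStep_eq_modify (d : PySem.Dict String (List String)) (p : String × String) :
    (let d' := if d.contains p.2 then d else d.insert p.2 []
     d'.modify p.2 [] (fun l => l ++ [p.1])) = d.modify p.2 [] (fun l => l ++ [p.1]) := by
  by_cases h : d.contains p.2
  · simp [h]
  · simp [h, PySem.Dict.modify, PySem.Dict.getD_insert_self, PySem.Dict.insert_insert_self,
      PySem.Dict.getD_of_not_contains]

-- getD of A's grouping fold, transported along Prod.swap to the library lemma.
theorem getD_groupFold (m : List (String × String)) (c : String) :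
    ((m.foldl (fun d p => d.modify p.2 [] (fun l => l ++ [p.1]))
      (PySem.Dict.empty : PySem.Dict String (List String))).getD c [])
      = (m.filter (fun p => p.2 == c)).map (·.1) := by
  have h := PySem.Dict.getD_foldl_modify_append (l := m.map Prod.swap)
    (d := (PySem.Dict.empty : PySem.Dict String (List String))) (c := c)
  rw [List.foldl_map] at h
  simp only [Prod.swap] at h
  rw [h]
  simp [PySem.Dict.getD_empty, List.filter_map, List.map_map, Function.comp_def]

theorem generate_pds_endpoint_to_dids_map_spec : Claim_equal_generate_pds_endpoint_to_dids_map := by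
  intro m _
  unfold Spec_generate_pds_endpoint_to_dids_map
  unfold generate_pds_endpoint_to_dids_map generate_pds_endpoint_to_dids_map_alt
  have hfun : (fun (d : PySem.Dict String (List String)) (p : String × String) =>
      let d' := if d.contains p.2 then d else d.insert p.2 []
      d'.modify p.2 [] (fun l => l ++ [p.1]))
      = fun d p => d.modify p.2 [] (fun l => l ++ [p.1]) := by
    funext d p; exact aStep_eq_modify d p
  rw [hfun]
  set D := m.foldl (fun d p => d.modify p.2 [] (fun l => l ++ [p.1]))
    (PySem.Dict.empty : PySem.Dict String (List String)) with hD
  have hnd : D.keys.Nodup := by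
    rw [hD]
    exact PySem.Dict.nodup_keys_foldl_modify_key m (·.2) [] _ _ PySem.Dict.nodup_keys_empty
  have hkeys : D.keys = PySem.Set.ofList (m.map (·.2)) := by
    rw [hD, PySem.Dict.keys_foldl_modify_key]
    simp [PySem.Dict.keys_empty, PySem.Set.update_nil_left]
  rw [PySem.Dict.items_eq_map_keys D hnd [], hkeys]
  apply List.map_congr_left
  intro k _
  rw [hD, getD_groupFold]
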